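-- pv_equiv track=rewrite | github.com/xypeng12/rl-signal-routing-sumo | Sioux/data/build_file.py | get_routes_xml
-- ===== SOURCE A (Python) =====
-- def get_routes_xml(route,o,d):
--     routes_output = []
--
--     for i in range(len(route)):
--         routes = []
--         for k in range(len(route[i])):
--             routes.append('e' + o[i] + '_' + 'n' + route[i][k][0] + ' ')
--             for j in range(len(route[i][k]) - 1):
--                 routes[k] += 'n' + route[i][k][j] + '_' + 'n' + route[i][k][j + 1] + ' '
--             routes[k] += ('n' + route[i][k][len(route[i][k]) - 1] + '_' + 'e' + d[i])
--         routes_output.append(routes)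
--     return routes_output
-- ===== SOURCE B (Python) =====
-- def get_routes_xml(route, o, d):
--     routes_output = []
--     for i, group in enumerate(route):
--         routes = []
--         for r in group:
--             tokens = ['e' + o[i]] + ['n' + x for x in r] + ['e' + d[i]]
--             routes.append(' '.join(tokens[j] + '_' + tokens[j + 1]
--                                    for j in range(len(tokens) - 1)))
--         routes_output.append(routes)
--     return routes_output
-- ===== Notes on version B (the rewrite author's own statement) =====
-- stated objective: simpler
-- what changed: B builds one token list ['e'+o[i]] + ['n'+x ...] + ['e'+d[i]] per inner route and produces the route string as a single ' '.join over consecutive token pairs, replacing A's three-phase prefix/index-loop/suffix string accumulation with manual spacing.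
import Mathlib
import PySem

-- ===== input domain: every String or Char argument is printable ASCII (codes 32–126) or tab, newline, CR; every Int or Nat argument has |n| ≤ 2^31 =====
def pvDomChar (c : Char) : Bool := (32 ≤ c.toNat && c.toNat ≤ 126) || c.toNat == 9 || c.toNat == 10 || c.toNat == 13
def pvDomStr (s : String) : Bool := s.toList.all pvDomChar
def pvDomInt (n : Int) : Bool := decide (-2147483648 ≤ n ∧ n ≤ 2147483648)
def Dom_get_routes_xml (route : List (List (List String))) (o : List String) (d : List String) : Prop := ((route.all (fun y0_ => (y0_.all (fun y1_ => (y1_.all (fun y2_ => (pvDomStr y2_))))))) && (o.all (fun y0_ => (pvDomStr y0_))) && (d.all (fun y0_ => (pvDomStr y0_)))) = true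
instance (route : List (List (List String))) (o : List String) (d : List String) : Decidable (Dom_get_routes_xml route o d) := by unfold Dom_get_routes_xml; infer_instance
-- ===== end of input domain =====

-- B replaces A's three-phase prefix/middle/suffix string accumulation by one token list per
-- route joined pairwise with ' '.join (objective: simpler decomposition; equal return values).

-- ===== PORT A =====
def get_routes_xml (route : List (List (List String))) (o : List String) (d : List String) : List (List String) :=
  (List.range route.length).foldl (fun routes_output i =>
    routes_output ++
      [(List.range (route.getD i []).length).foldl (fun routes k =>
        routes ++
          [((List.range (((route.getD i []).getD k []).length - 1)).foldl (fun s j =>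
              s ++ ("n" ++ ((route.getD i []).getD k []).getD j "" ++ "_" ++ "n" ++
                    ((route.getD i []).getD k []).getD (j + 1) "" ++ " "))
            ("e" ++ o.getD i "" ++ "_" ++ "n" ++ ((route.getD i []).getD k []).getD 0 "" ++ " ")) ++
           ("n" ++ ((route.getD i []).getD k []).getD (((route.getD i []).getD k []).length - 1) "" ++
            "_" ++ "e" ++ d.getD i "")]) []]) []

-- ===== PORT B =====
def get_routes_xml_alt (route : List (List (List String))) (o : List String) (d : List String) : List (List String) :=
  (PySem.List.enumerate route).foldl (fun routes_output p =>
    routes_output ++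
      [p.2.foldl (fun routes r =>
        routes ++
          [PySem.Str.join " "
            ((List.range ((["e" ++ PySem.List.pyGetD o p.1 ""] ++ r.map (fun x => "n" ++ x) ++
                           ["e" ++ PySem.List.pyGetD d p.1 ""]).length - 1)).map (fun j =>
              (["e" ++ PySem.List.pyGetD o p.1 ""] ++ r.map (fun x => "n" ++ x) ++
               ["e" ++ PySem.List.pyGetD d p.1 ""]).getD j "" ++ "_" ++
              (["e" ++ PySem.List.pyGetD o p.1 ""] ++ r.map (fun x => "n" ++ x) ++
               ["e" ++ PySem.List.pyGetD d p.1 ""]).getD (j + 1) ""))]) []]) []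

-- ===== PRECONDITION & SPEC =====
-- Pre_: exactly the inputs where Python A returns (no IndexError): for every group index i,
-- either the group is empty (its loop body never runs) or o[i] and d[i] exist and every
-- inner route in the group is nonempty (else route[i][k][0] raises).
def Pre_get_routes_xml (route : List (List (List String))) (o : List String) (d : List String) : Prop :=
  ∀ i, i < route.length →
    route.getD i [] = [] ∨ (i < o.length ∧ i < d.length ∧ [] ∉ route.getD i [])
instance (route : List (List (List String))) (o : List String) (d : List String) : Decidable (Pre_get_routes_xml route o d) := by unfold Pre_get_routes_xml; infer_instance

def pvWitness_get_routes_xml : List (List (List String)) × List String × List String :=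
  ([[["a"], ["b", "c"]], []], ["x", "y"], ["u", "v"])

def Spec_get_routes_xml (route : List (List (List String))) (o : List String) (d : List String) (out : List (List String)) : Prop := out = get_routes_xml_alt route o d
instance (route : List (List (List String))) (o : List String) (d : List String) (out : List (List String)) : Decidable (Spec_get_routes_xml route o d out) := by unfold Spec_get_routes_xml; infer_instance

-- ===== CLAIM (what is proved, stated in full; the proofs are below) =====
def Claim_equal_get_routes_xml : Prop := ∀ (route : List (List (List String))) (o : List String) (d : List String), Dom_get_routes_xml route o d → Pre_get_routes_xml route o d → Spec_get_routes_xml route o d (get_routes_xml route o d)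


-- ===== LEMMAS AND PROOFS =====

-- concatenation of a list of strings (proof-side helper)
def pvStrcat : List String → String
  | [] => ""
  | s :: t => s ++ pvStrcat t

theorem pvFoldl_str_append {α : Type} (g : α → String) (l : List α) (acc : String) :
    l.foldl (fun s x => s ++ g x) acc = acc ++ pvStrcat (l.map g) := by
  induction l generalizing acc with
  | nil => simp [pvStrcat]
  | cons x t ih => simp [pvStrcat, ih, String.append_assoc]

theorem pvMap_range_consec {α β : Type} (F : α → α → β) (dflt : α) :
    ∀ (l : List α), (List.range (l.length - 1)).map
        (fun j => F (l.getD j dflt) (l.getD (j + 1) dflt)) =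
      (l.zip l.tail).map (fun p => F p.1 p.2) := by
  intro l
  induction l with
  | nil => simp
  | cons x t ih =>
    cases t with
    | nil => simp
    | cons y t' =>
      have hlen : (x :: y :: t').length - 1 = ((y :: t').length - 1) + 1 := by simp
      rw [hlen, List.range_succ_eq_map, List.map_cons, List.map_map]
      simp only [Function.comp_def, List.getD_cons_succ] at ih ⊢
      rw [ih]
      simp

theorem pvConsecMid (l : List String) :
    (List.range (l.length - 1)).map
        (fun j => "n" ++ l.getD j "" ++ "_" ++ "n" ++ l.getD (j + 1) "" ++ " ") =
      (l.zip l.tail).map (fun p => "n" ++ p.1 ++ "_" ++ "n" ++ p.2 ++ " ") :=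
  pvMap_range_consec (fun a b => "n" ++ a ++ "_" ++ "n" ++ b ++ " ") "" l

theorem pvConsecPair (l : List String) :
    (List.range (l.length - 1)).map
        (fun j => l.getD j "" ++ "_" ++ l.getD (j + 1) "") =
      (l.zip l.tail).map (fun p => p.1 ++ "_" ++ p.2) :=
  pvMap_range_consec (fun a b => a ++ "_" ++ b) "" l

theorem pvJoin_singleton (sep a : String) : PySem.Str.join sep [a] = a := by
  rw [← String.toList_inj]; simp [PySem.Chars.join_singleton]

theorem pvJoin_cons_of_ne_nil (sep a : String) (l : List String) (h : l ≠ []) :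
    PySem.Str.join sep (a :: l) = a ++ sep ++ PySem.Str.join sep l := by
  cases l with
  | nil => exact absurd rfl h
  | cons b t =>
    rw [← String.toList_inj]; simp [PySem.Chars.join_cons_cons]

-- core: the middle+suffix of A's route string equals the ' '-join of the pairwise
-- tokens built from the tail of the token list
theorem pvCore (E1 : String) :
    ∀ (rest : List String) (x : String),
      pvStrcat (((x :: rest).zip rest).map
          (fun p => "n" ++ p.1 ++ "_" ++ "n" ++ p.2 ++ " ")) ++
        ("n" ++ ((x :: rest).getD rest.length "") ++ "_" ++ E1) =
      PySem.Str.join " "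
        (((("n" ++ x) :: (rest.map (fun y => "n" ++ y) ++ [E1])).zip
            (rest.map (fun y => "n" ++ y) ++ [E1])).map (fun p => p.1 ++ "_" ++ p.2)) := by
  intro rest
  induction rest with
  | nil =>
    intro x
    simp [pvStrcat, pvJoin_singleton, String.append_assoc]
  | cons y rs ih =>
    intro x
    have hz : ((("n" ++ y) :: (rs.map (fun y => "n" ++ y) ++ [E1])).zip
        (rs.map (fun y => "n" ++ y) ++ [E1])).map (fun p => p.1 ++ "_" ++ p.2) ≠ [] := by
      cases rs <;> simp
    calc pvStrcat (((x :: y :: rs).zip (y :: rs)).map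
            (fun p => "n" ++ p.1 ++ "_" ++ "n" ++ p.2 ++ " ")) ++
          ("n" ++ ((x :: y :: rs).getD (y :: rs).length "") ++ "_" ++ E1)
        = ("n" ++ x ++ "_" ++ "n" ++ y ++ " ") ++
            (pvStrcat (((y :: rs).zip rs).map
              (fun p => "n" ++ p.1 ++ "_" ++ "n" ++ p.2 ++ " ")) ++
             ("n" ++ ((y :: rs).getD rs.length "") ++ "_" ++ E1)) := by
          simp [pvStrcat, String.append_assoc]
          try rfl
      _ = ("n" ++ x ++ "_" ++ "n" ++ y ++ " ") ++
            PySem.Str.join " "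
              (((("n" ++ y) :: (rs.map (fun y => "n" ++ y) ++ [E1])).zip
                  (rs.map (fun y => "n" ++ y) ++ [E1])).map (fun p => p.1 ++ "_" ++ p.2)) := by
          rw [ih]
      _ = _ := by
          simp only [List.map_cons, List.cons_append, List.zip_cons_cons]
          rw [pvJoin_cons_of_ne_nil _ _ _ hz]
          rw [← String.toList_inj]; simp

-- per-route string: A's accumulated string equals B's join of pairwise tokens
theorem pvRouteString (oi di : String) (r : List String) (h : r ≠ []) :
    ((List.range (r.length - 1)).foldl (fun s j =>
        s ++ ("n" ++ r.getD j "" ++ "_" ++ "n" ++ r.getD (j + 1) "" ++ " "))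
      ("e" ++ oi ++ "_" ++ "n" ++ r.getD 0 "" ++ " ")) ++
     ("n" ++ r.getD (r.length - 1) "" ++ "_" ++ "e" ++ di) =
    PySem.Str.join " "
      ((List.range ((["e" ++ oi] ++ r.map (fun x => "n" ++ x) ++ ["e" ++ di]).length - 1)).map
        (fun j => (["e" ++ oi] ++ r.map (fun x => "n" ++ x) ++ ["e" ++ di]).getD j "" ++ "_" ++
                  (["e" ++ oi] ++ r.map (fun x => "n" ++ x) ++ ["e" ++ di]).getD (j + 1) "")) := by
  cases r with
  | nil => exact absurd rfl h
  | cons x rest =>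
    rw [pvFoldl_str_append, pvConsecMid, pvConsecPair]
    simp only [List.map_cons, List.cons_append, List.nil_append, List.tail_cons,
      List.zip_cons_cons, List.getD_cons_zero]
    rw [pvJoin_cons_of_ne_nil _ _ _ (by cases rest <;> simp)]
    rw [show (x :: rest).length - 1 = rest.length from by simp]
    rw [← pvCore ("e" ++ di) rest x]
    rw [← String.toList_inj]; simp

-- ===== VERDICT (by name: the statement is the Claim_ definition above) =====
theorem get_routes_xml_spec : Claim_equal_get_routes_xml := by
  intro route o d _ hpre
  unfold Spec_get_routes_xml get_routes_xml get_routes_xml_alt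
  rw [PySem.List.foldl_append_singleton_eq_map
    (fun i => (List.range (route.getD i []).length).foldl _ []),
    PySem.List.foldl_append_singleton_eq_map (fun p : Int × List (List String) => _)]
  simp only [List.nil_append]
  apply List.ext_getElem
  · simp [PySem.List.length_enumerate]
  · intro i h1 h2
    have hi : i < route.length := by simpa using h1
    simp only [List.getElem_map, List.getElem_range, PySem.List.getElem_enumerate]
    rw [List.getD_eq_getElem route [] hi]
    rw [PySem.List.foldl_append_singleton_eq_map, PySem.List.foldl_append_singleton_eq_map]
    simp only [List.nil_append]
    have hcast : PySem.List.pyGetD o ((0 : Int) + (i : Nat)) "" = o.getD i "" := by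
      rw [show ((0 : Int) + (i : Nat)) = ((i : Nat) : Int) from by omega]
      exact PySem.List.pyGetD_natCast o i ""
    have hcastd : PySem.List.pyGetD d ((0 : Int) + (i : Nat)) "" = d.getD i "" := by
      rw [show ((0 : Int) + (i : Nat)) = ((i : Nat) : Int) from by omega]
      exact PySem.List.pyGetD_natCast d i ""
    rw [hcast, hcastd]
    apply List.ext_getElem
    · simp
    · intro k hk1 hk2
      have hk : k < route[i].length := by simpa using hk1
      simp only [List.getElem_map, List.getElem_range]
      rw [List.getD_eq_getElem route[i] [] hk]
      have hmem : route[i][k] ∈ route[i] := List.getElem_mem hk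
      have hne : route[i][k] ≠ [] := by
        rcases hpre i hi with hemp | ⟨_, _, hnin⟩
        · rw [List.getD_eq_getElem route [] hi] at hemp
          rw [hemp] at hk; simp at hk
        · rw [List.getD_eq_getElem route [] hi] at hnin
          intro hc; exact hnin (hc ▸ hmem)
      exact pvRouteString (o.getD i "") (d.getD i "") route[i][k] hne
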